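-- pv_equiv track=rewrite | github.com/losa201/Aetherveil | chimera/chimera/memory/knowledge_transfer.py | _group_related_techniques
-- ===== SOURCE A (Python) =====
-- from typing import Dict, Any, List, Optional, Tuple, Set
-- from collections import defaultdict
--
-- def _group_related_techniques(knowledge_nodes: List[Dict[str, Any]]) -> Dict[str, List[Dict[str, Any]]]:
--     """Group related techniques from knowledge nodes"""
--
--     groups = defaultdict(list)
--
--     for node in knowledge_nodes:
--         content = node.get("content", "").lower()
--
--         # Simple grouping by technique type
--         if any(word in content for word in ["scan", "enumerate", "discover"]):
--             groups["enumeration_techniques"].append(node)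
--         elif any(word in content for word in ["inject", "payload", "exploit"]):
--             groups["exploitation_techniques"].append(node)
--         elif any(word in content for word in ["auth", "login", "credential"]):
--             groups["authentication_techniques"].append(node)
--         elif any(word in content for word in ["config", "setting", "parameter"]):
--             groups["configuration_techniques"].append(node)
--         else:
--             groups["general_techniques"].append(node)
--
--     return groups
-- ===== SOURCE B (Python) =====
-- from collections import defaultdict
--
-- _CATS = ["enumeration_techniques", "exploitation_techniques",
--          "authentication_techniques", "configuration_techniques"]
-- _KEYWORDS = [["scan", "enumerate", "discover"],
--              ["inject", "payload", "exploit"],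
--              ["auth", "login", "credential"],
--              ["config", "setting", "parameter"]]
--
-- def _label(content):
--     hits = [i for i, ws in enumerate(_KEYWORDS) if any(w in content for w in ws)]
--     return _CATS[min(hits)] if hits else "general_techniques"
--
-- def _group_related_techniques(knowledge_nodes):
--     """Staged grouping: label all nodes, dedup labels in first-appearance order,
--     then build each group by one filter pass per distinct label."""
--     labels = [_label(n.get("content", "").lower()) for n in knowledge_nodes]
--     groups = defaultdict(list)
--     for key in dict.fromkeys(labels):
--         groups[key] = [n for n, l in zip(knowledge_nodes, labels) if l == key]
--     return groups
-- ===== Notes on version B (the rewrite author's own statement) =====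
-- stated objective: alternative
-- what changed: Replaces A's single pass that mutates a defaultdict per node through an if/elif chain by a staged algorithm: label every node via the minimum matching category index, dedup the labels in first-appearance order, then build each group with one filter pass per distinct label.
import Mathlib
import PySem

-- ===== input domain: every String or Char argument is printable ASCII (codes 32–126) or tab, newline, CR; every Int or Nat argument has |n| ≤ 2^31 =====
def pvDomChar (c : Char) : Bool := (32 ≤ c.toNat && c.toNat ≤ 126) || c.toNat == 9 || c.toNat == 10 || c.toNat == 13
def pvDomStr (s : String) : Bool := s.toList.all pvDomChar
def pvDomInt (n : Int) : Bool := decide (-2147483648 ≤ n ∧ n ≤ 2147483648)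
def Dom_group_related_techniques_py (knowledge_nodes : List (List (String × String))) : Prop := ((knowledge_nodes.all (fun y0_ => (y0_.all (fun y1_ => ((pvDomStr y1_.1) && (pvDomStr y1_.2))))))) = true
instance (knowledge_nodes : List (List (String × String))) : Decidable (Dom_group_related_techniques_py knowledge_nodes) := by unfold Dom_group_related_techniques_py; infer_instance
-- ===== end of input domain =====

-- B replaces A's one-pass dict-mutation loop by a staged algorithm: label every node
-- (min over matching category indices), dedup the labels in first-appearance order, then
-- build each group by one filter pass per distinct label (objective: alternative).

-- ===== PORT A =====
-- A: defaultdict(list); per node an if/elif keyword chain, each branch appending to its own key.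
def group_related_techniques_py (knowledge_nodes : List (List (String × String))) : List (String × List (List (String × String))) :=
  (knowledge_nodes.foldl (fun groups node =>
      let content := PySem.Str.lower (PySem.Dict.getD (PySem.Dict.mk node) "content" "")
      if ["scan", "enumerate", "discover"].any (fun w => PySem.Str.isIn w content) then
        PySem.Dict.modify groups "enumeration_techniques" [] (· ++ [node])
      else if ["inject", "payload", "exploit"].any (fun w => PySem.Str.isIn w content) then
        PySem.Dict.modify groups "exploitation_techniques" [] (· ++ [node])
      else if ["auth", "login", "credential"].any (fun w => PySem.Str.isIn w content) then
        PySem.Dict.modify groups "authentication_techniques" [] (· ++ [node])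
      else if ["config", "setting", "parameter"].any (fun w => PySem.Str.isIn w content) then
        PySem.Dict.modify groups "configuration_techniques" [] (· ++ [node])
      else
        PySem.Dict.modify groups "general_techniques" [] (· ++ [node]))
    PySem.Dict.empty).items

-- ===== PORT B =====
def pvCats : List String :=
  ["enumeration_techniques", "exploitation_techniques",
   "authentication_techniques", "configuration_techniques"]

def pvKeywords : List (List String) :=
  [["scan", "enumerate", "discover"],
   ["inject", "payload", "exploit"],
   ["auth", "login", "credential"],
   ["config", "setting", "parameter"]]

-- _label: indices of all matching categories, then the minimum one (default key if none matched).
def pvLabel (content : String) : String :=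
  let hits := ((PySem.List.enumerate pvKeywords).filter
      (fun p => p.2.any (fun w => PySem.Str.isIn w content))).map (·.1)
  match PySem.List.min? hits (fun x => x) with
  | some i => PySem.List.pyGetD pvCats i ""   -- _CATS[min(hits)]; min(hits) ∈ {0,1,2,3}, always in range
  | none => "general_techniques"

-- staged: label pass, ordered dedup of the labels, one filter pass per distinct label.
def group_related_techniques_py_alt (knowledge_nodes : List (List (String × String))) : List (String × List (List (String × String))) :=
  let labels := knowledge_nodes.map (fun n =>
      pvLabel (PySem.Str.lower (PySem.Dict.getD (PySem.Dict.mk n) "content" "")))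
  ((PySem.List.dedup labels).foldl (fun groups key =>
      PySem.Dict.insert groups key
        (((knowledge_nodes.zip labels).filter (fun p => p.2 == key)).map (·.1)))
    PySem.Dict.empty).items

-- ===== PRECONDITION & SPEC =====
def Spec_group_related_techniques_py (knowledge_nodes : List (List (String × String))) (out : List (String × List (List (String × String)))) : Prop := out = group_related_techniques_py_alt knowledge_nodes
instance (knowledge_nodes : List (List (String × String))) (out : List (String × List (List (String × String)))) : Decidable (Spec_group_related_techniques_py knowledge_nodes out) := by unfold Spec_group_related_techniques_py; infer_instance

-- ===== CLAIM =====
def Claim_equal_group_related_techniques_py : Prop := ∀ (knowledge_nodes : List (List (String × String))), Dom_group_related_techniques_py knowledge_nodes → Spec_group_related_techniques_py knowledge_nodes (group_related_techniques_py knowledge_nodes)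

-- ===== LEMMAS AND PROOFS =====

-- A's per-node key choice, abstracted out of the loop body.
def pvChainKey (content : String) : String :=
  if ["scan", "enumerate", "discover"].any (fun w => PySem.Str.isIn w content) then "enumeration_techniques"
  else if ["inject", "payload", "exploit"].any (fun w => PySem.Str.isIn w content) then "exploitation_techniques"
  else if ["auth", "login", "credential"].any (fun w => PySem.Str.isIn w content) then "authentication_techniques"
  else if ["config", "setting", "parameter"].any (fun w => PySem.Str.isIn w content) then "configuration_techniques"
  else "general_techniques"

-- B's min-over-hit-indices label equals A's first-match key (16-way case split on the four keyword tests).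
lemma pvLabel_eq (content : String) : pvLabel content = pvChainKey content := by
  unfold pvLabel pvChainKey pvKeywords
  simp only [PySem.List.enumerate_cons, PySem.List.enumerate_nil, List.filter_cons, List.filter_nil]
  generalize (["scan", "enumerate", "discover"].any fun w => PySem.Str.isIn w content) = b0
  generalize (["inject", "payload", "exploit"].any fun w => PySem.Str.isIn w content) = b1
  generalize (["auth", "login", "credential"].any fun w => PySem.Str.isIn w content) = b2
  generalize (["config", "setting", "parameter"].any fun w => PySem.Str.isIn w content) = b3
  cases b0 <;> cases b1 <;> cases b2 <;> cases b3 <;> rfl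

-- a node's label
def pvTag (n : List (String × String)) : String :=
  pvChainKey (PySem.Str.lower (PySem.Dict.getD (PySem.Dict.mk n) "content" ""))

-- A's loop is a keyed modify-append fold over (label, node) pairs.
lemma pvA_eq_pairs_fold (kn : List (List (String × String))) :
    group_related_techniques_py kn =
      ((kn.map (fun n => (pvTag n, n))).foldl
        (fun d p => PySem.Dict.modify d p.1 [] (· ++ [p.2])) PySem.Dict.empty).items := by
  unfold group_related_techniques_py
  rw [List.foldl_map]
  refine congrArg PySem.Dict.items (List.foldl_ext _ _ _ ?_)
  intro d n _
  simp only [pvTag, pvChainKey]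
  split_ifs <;> rfl

lemma pv_zip_map_self {α β : Type} (l : List α) (f : α → β) :
    l.zip (l.map f) = l.map (fun x => (x, f x)) := by
  induction l with
  | nil => rfl
  | cons x t ih => simp [ih]

theorem group_related_techniques_py_spec : Claim_equal_group_related_techniques_py := by
  intro kn _
  unfold Spec_group_related_techniques_py
  -- B's label list is the list of A's chain keys
  have hlab : (kn.map (fun n =>
      pvLabel (PySem.Str.lower (PySem.Dict.getD (PySem.Dict.mk n) "content" "")))) = kn.map pvTag := by
    simp [pvLabel_eq, pvTag]
  -- A's items: keys in first-appearance order, each with the filtered group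
  set D := ((kn.map (fun n => (pvTag n, n))).foldl
      (fun d p => PySem.Dict.modify d p.1 [] (· ++ [p.2])) PySem.Dict.empty) with hD
  have hkeys : D.keys = PySem.Set.ofList (kn.map pvTag) := by
    rw [hD, PySem.Dict.keys_foldl_modify_key]
    simp [PySem.Set.update_nil_left, Function.comp_def]
  have hnd : D.keys.Nodup := by
    rw [hkeys]; exact PySem.Set.nodup_ofList _
  have hA : group_related_techniques_py kn =
      (PySem.Set.ofList (kn.map pvTag)).map
        (fun k => (k, (kn.filter (fun n => pvTag n == k)).map id)) := by
    rw [pvA_eq_pairs_fold, PySem.Dict.items_eq_map_keys D hnd [], hkeys]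
    apply List.map_congr_left
    intro k _
    have := PySem.Dict.getD_foldl_modify_append (kn.map (fun n => (pvTag n, n)))
      (PySem.Dict.empty (κ := String) (ν := List (List (String × String)))) k
    rw [← hD] at this
    rw [this]
    simp [List.filter_map, List.map_map, Function.comp_def]
  -- B's items: same keys, each inserted fresh with the filtered group
  have hB : group_related_techniques_py_alt kn =
      (PySem.Set.ofList (kn.map pvTag)).map
        (fun k => (k, (kn.filter (fun n => pvTag n == k)).map id)) := by
    simp only [group_related_techniques_py_alt, hlab]
    rw [PySem.List.dedup_eq_ofList]
    refine (PySem.Dict.items_foldl_insert_fresh (PySem.Set.ofList (kn.map pvTag))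
      (fun key => key)
      (fun key => ((kn.zip (kn.map pvTag)).filter (fun p => p.2 == key)).map (·.1))
      PySem.Dict.empty
      (fun a _ => PySem.Dict.contains_empty a)
      (by simp)).trans ?_
    rw [show (PySem.Dict.empty (κ := String) (ν := List (List (String × String)))).items = [] from rfl, List.nil_append]
    apply List.map_congr_left
    intro k _
    rw [pv_zip_map_self]
    simp [List.filter_map, List.map_map, Function.comp_def]
  rw [hA, hB]
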